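-- pv_equiv track=rewrite | github.com/jinka1997/Python_Lcm_Gcv | Python_Lcm_Gcv/Python_Lcm_Gcv.py | lineup_power_index
-- ===== SOURCE A (Python) =====
-- def lineup_power_index(pfs):
--     dic = {}
--     lst = []
--     for pf in pfs:
--         lst.extend(list(pf.keys()))
--     primes = list(set(lst))
--
--     for p in primes:
--         dic[p] = [0] * len(pfs)
--
--     idx = 0
--     for pf in pfs:
--         for key,value in pf.items():
--             dic[key][idx] = value
--         idx += 1
--
--     return dic
-- ===== SOURCE B (Python) =====
-- def lineup_power_index(pfs):
--     primes = set(k for pf in pfs for k in pf)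
--     return {p: [pf.get(p, 0) for pf in pfs] for p in primes}
-- ===== Notes on version B (the rewrite author's own statement) =====
-- stated objective: simpler
-- what changed: Replaces the zero-preallocate-then-scatter-by-index construction with a transposed single gather pass: for each prime, its exponent vector is read off directly as [pf.get(p, 0) for pf in pfs], eliminating the initialization loop and the index counter.
import Mathlib
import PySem

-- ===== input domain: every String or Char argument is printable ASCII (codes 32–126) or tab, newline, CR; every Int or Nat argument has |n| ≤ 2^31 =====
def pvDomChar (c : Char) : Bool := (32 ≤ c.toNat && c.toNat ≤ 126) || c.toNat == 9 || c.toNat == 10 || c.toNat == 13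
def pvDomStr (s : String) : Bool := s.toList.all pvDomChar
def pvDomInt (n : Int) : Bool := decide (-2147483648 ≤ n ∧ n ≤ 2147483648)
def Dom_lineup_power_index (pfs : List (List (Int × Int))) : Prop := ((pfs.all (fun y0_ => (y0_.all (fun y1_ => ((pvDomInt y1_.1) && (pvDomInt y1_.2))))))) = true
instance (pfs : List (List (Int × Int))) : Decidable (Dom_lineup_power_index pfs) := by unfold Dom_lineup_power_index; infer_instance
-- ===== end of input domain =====

-- B replaces A's zero-preallocate-then-scatter-by-index dict construction with a single
-- transposed gather pass (per prime p, the vector is read off as [pf.get(p, 0) for pf in pfs]); objective: simpler.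
-- Each Python argument pf is a dict; its List (Int × Int) encoding is canonicalised by pvCanon
-- (insertion-order dict build: first position wins for the key, last value wins), exact for Python dict(...).

-- ===== PORT A =====
def pvCanon (pf : List (Int × Int)) : List (Int × Int) :=
  (pf.foldl (fun d kv => PySem.Dict.insert d kv.1 kv.2) (PySem.Dict.mk [])).items

def lineup_power_index (pfs : List (List (Int × Int))) : List (Int × List Int) :=
  let lst : List Int := pfs.foldl (fun acc pf => acc ++ (pvCanon pf).map Prod.fst) []
  let primes : List Int := PySem.Set.ofList lst
  let dic0 : PySem.Dict Int (List Int) :=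
    primes.foldl (fun d p => d.insert p (List.replicate pfs.length 0)) (PySem.Dict.mk [])
  let dic : PySem.Dict Int (List Int) :=
    (pfs.foldl (fun (st : PySem.Dict Int (List Int) × Nat) pf =>
        ((pvCanon pf).foldl (fun dd kv => dd.modify kv.1 [] (fun x => x.set st.2 kv.2)) st.1,
         st.2 + 1)) (dic0, 0)).1
  dic.items

-- ===== PORT B =====
def lineup_power_index_alt (pfs : List (List (Int × Int))) : List (Int × List Int) :=
  let ds : List (List (Int × Int)) := pfs.map pvCanon
  let primes : List Int := PySem.Set.ofList (ds.flatMap (fun d => d.map Prod.fst))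
  primes.map (fun p => (p, ds.map (fun d => PySem.Dict.getD (PySem.Dict.mk d) p 0)))

-- ===== PRECONDITION & SPEC =====
def Spec_lineup_power_index (pfs : List (List (Int × Int))) (out : List (Int × List Int)) : Prop := out = lineup_power_index_alt pfs
instance (pfs : List (List (Int × Int))) (out : List (Int × List Int)) : Decidable (Spec_lineup_power_index pfs out) := by unfold Spec_lineup_power_index; infer_instance

-- ===== CLAIM (what is proved, stated in full; the proofs are below) =====
def Claim_equal_lineup_power_index : Prop := ∀ (pfs : List (List (Int × Int))), Dom_lineup_power_index pfs → Spec_lineup_power_index pfs (lineup_power_index pfs)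

-- ===== LEMMAS AND PROOFS =====

theorem pv_get?_map (primes : List Int) (g : Int → List Int) (k : Int) (hk : k ∈ primes) :
    (PySem.Dict.mk (primes.map fun p => (p, g p))).get? k = some (g k) := by
  induction primes with
  | nil => cases hk
  | cons q t ih =>
    simp only [PySem.Dict.get?, List.map_cons, List.find?_cons] at *
    by_cases h : q = k
    · subst h; simp
    · have hbe : ((q, g q).1 == k) = false := by simp [h]
      rw [hbe]
      rcases List.mem_cons.mp hk with h' | h'
      · exact absurd h'.symm h
      · exact ih h'

theorem pv_insert_map (primes : List Int) (g : Int → List Int) (k : Int) (v : List Int) (hk : k ∈ primes) :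
    (PySem.Dict.mk (primes.map fun p => (p, g p))).insert k v
      = PySem.Dict.mk (primes.map fun p => (p, if p = k then v else g p)) := by
  have hc : (PySem.Dict.mk (primes.map fun p => (p, g p))).contains k = true := by
    simp [PySem.Dict.contains, List.any_eq_true]
    exact hk
  simp only [PySem.Dict.insert, hc, if_true, List.map_map]
  congr 1
  apply List.map_congr_left
  intro p _
  by_cases h : p = k
  · subst h; simp
  · simp [h]

theorem pv_modify_map (primes : List Int) (g : Int → List Int) (k : Int) (f : List Int → List Int) (hk : k ∈ primes) :
    (PySem.Dict.mk (primes.map fun p => (p, g p))).modify k [] f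
      = PySem.Dict.mk (primes.map fun p => (p, if p = k then f (g k) else g p)) := by
  unfold PySem.Dict.modify PySem.Dict.getD
  rw [pv_get?_map primes g k hk]
  exact pv_insert_map primes g k (f (g k)) hk

theorem pv_inner_fold (l : List (Int × Int)) (primes : List Int) (idx : Nat) :
    ∀ (g : Int → List Int), (∀ kv ∈ l, kv.1 ∈ primes) →
    l.foldl (fun dd kv => dd.modify kv.1 [] (fun x => x.set idx kv.2))
        (PySem.Dict.mk (primes.map fun p => (p, g p)))
      = PySem.Dict.mk (primes.map fun p =>
          (p, l.foldl (fun x kv => if p = kv.1 then x.set idx kv.2 else x) (g p))) := by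
  induction l with
  | nil => intro g _; simp
  | cons kv t ih =>
    intro g hmem
    simp only [List.foldl_cons]
    rw [pv_modify_map primes g kv.1 _ (hmem kv (List.mem_cons_self ..))]
    rw [ih (fun p => if p = kv.1 then (g kv.1).set idx kv.2 else g p)
        (fun x hx => hmem x (List.mem_cons_of_mem _ hx))]
    congr 1
    apply List.map_congr_left
    intro p _
    by_cases h : p = kv.1 <;> simp [h]

theorem pv_vfold_not_mem (l : List (Int × Int)) (idx : Nat) (p : Int) (x : List Int)
    (h : p ∉ l.map Prod.fst) :
    l.foldl (fun x kv => if p = kv.1 then x.set idx kv.2 else x) x = x := by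
  induction l generalizing x with
  | nil => rfl
  | cons kv t ih =>
    simp only [List.map_cons, List.mem_cons, not_or] at h
    simp only [List.foldl_cons, if_neg h.1]
    exact ih x h.2

theorem pv_vfold_lookup (l : List (Int × Int)) (idx : Nat) (p : Int) (x : List Int)
    (hnd : (l.map Prod.fst).Nodup) :
    l.foldl (fun x kv => if p = kv.1 then x.set idx kv.2 else x) x
      = ((PySem.Dict.mk l).get? p).elim x (fun v => x.set idx v) := by
  induction l generalizing x with
  | nil => simp [PySem.Dict.get?]
  | cons kv t ih =>
    simp only [List.map_cons, List.nodup_cons] at hnd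
    simp only [List.foldl_cons, PySem.Dict.get?, List.find?_cons]
    by_cases h : p = kv.1
    · subst h
      have hbe : (kv.1 == kv.1) = true := by simp
      rw [if_pos rfl, hbe]
      simp only [Option.elim]
      exact pv_vfold_not_mem t idx kv.1 _ hnd.1
    · have hbe : (kv.1 == p) = false := by simp [Ne.symm h]
      rw [if_neg h, hbe]
      exact ih x hnd.2

theorem pv_set_append (a b : List Int) (v : Int) :
    (a ++ b).set a.length v = a ++ b.set 0 v := by
  induction a with
  | nil => simp
  | cons q t ih => simp [ih]

theorem pv_init_fold (primes : List Int) (c : List Int) :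
    ∀ (acc : List (Int × List Int)), primes.Nodup → (∀ p ∈ primes, p ∉ acc.map Prod.fst) →
    primes.foldl (fun d p => d.insert p c) (PySem.Dict.mk acc)
      = PySem.Dict.mk (acc ++ primes.map fun p => (p, c)) := by
  induction primes with
  | nil => intro acc _ _; simp
  | cons q t ih =>
    intro acc hnd hni
    simp only [List.nodup_cons] at hnd
    have hq : q ∉ acc.map Prod.fst := hni q (List.mem_cons_self ..)
    have hc : (PySem.Dict.mk acc).contains q = false := by
      simp only [PySem.Dict.contains, List.any_eq_false]
      intro kv hkv
      simp only [beq_iff_eq]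
      intro h
      exact hq (h ▸ List.mem_map_of_mem hkv)
    rw [List.foldl_cons]
    have hins : (PySem.Dict.mk acc).insert q c = PySem.Dict.mk (acc ++ [(q, c)]) := by
      simp [PySem.Dict.insert, hc]
    rw [hins, ih (acc ++ [(q, c)]) hnd.2]
    · simp
    · intro p hp
      simp only [List.map_append, List.mem_append]
      rintro (h | h)
      · exact hni p (List.mem_cons_of_mem _ hp) h
      · simp at h; exact hnd.1 (h ▸ hp)

theorem pv_insert_keys_nodup (d : PySem.Dict Int Int) (k v : Int)
    (h : (d.items.map Prod.fst).Nodup) : (((d.insert k v).items).map Prod.fst).Nodup := by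
  by_cases hc : d.contains k = true
  · simp only [PySem.Dict.insert, hc, if_true]
    have : (List.map (fun p => if (p.1 == k) = true then (k, v) else p) d.items).map Prod.fst
        = d.items.map Prod.fst := by
      rw [List.map_map]
      apply List.map_congr_left
      intro p _
      by_cases h1 : p.1 = k
      · simp [h1]
      · simp [h1]
    rw [this]; exact h
  · have hc' : d.contains k = false := by simpa using hc
    simp only [PySem.Dict.insert, hc', Bool.false_eq_true, if_false]
    rw [List.map_append]
    simp only [PySem.Dict.contains, List.any_eq_true, not_exists] at hc
    have hk : k ∉ d.items.map Prod.fst := by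
      intro hm
      rcases List.mem_map.mp hm with ⟨kv, hkv, hfst⟩
      exact hc kv ⟨hkv, by simp [hfst]⟩
    simp only [List.nodup_append, List.map_cons, List.map_nil]
    refine ⟨h, List.nodup_singleton _, ?_⟩
    intro a ha b hb
    rw [List.mem_singleton] at hb
    subst hb
    intro hak
    exact hk (hak ▸ ha)

theorem pv_canon_keys_nodup (pf : List (Int × Int)) :
    (((pf.foldl (fun d kv => PySem.Dict.insert d kv.1 kv.2) (PySem.Dict.mk [])).items).map Prod.fst).Nodup := by
  suffices h : ∀ (d : PySem.Dict Int Int), (d.items.map Prod.fst).Nodup →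
      (((pf.foldl (fun d kv => PySem.Dict.insert d kv.1 kv.2) d).items).map Prod.fst).Nodup by
    exact h (PySem.Dict.mk []) (by simp)
  induction pf with
  | nil => intro d hd; exact hd
  | cons kv t ih =>
    intro d hd
    exact ih _ (pv_insert_keys_nodup d kv.1 kv.2 hd)

def pvLkp (l : List (Int × Int)) (p : Int) : Int := ((PySem.Dict.mk l).get? p).getD 0

theorem pv_outer_fold (primes : List Int) (ds : List (List (Int × Int))) :
    ∀ (idx : Nat) (pre : Int → List Int),
    (∀ d ∈ ds, ∀ kv ∈ d, kv.1 ∈ primes) →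
    (∀ d ∈ ds, (d.map Prod.fst).Nodup) →
    (∀ p, (pre p).length = idx) →
    (ds.foldl (fun (st : PySem.Dict Int (List Int) × Nat) d =>
        (d.foldl (fun dd kv => dd.modify kv.1 [] (fun x => x.set st.2 kv.2)) st.1, st.2 + 1))
      (PySem.Dict.mk (primes.map fun p => (p, pre p ++ List.replicate ds.length 0)), idx)).1
    = PySem.Dict.mk (primes.map fun p => (p, pre p ++ ds.map (fun d => pvLkp d p))) := by
  induction ds with
  | nil => intro idx pre _ _ _; simp
  | cons d t ih =>
    intro idx pre hk hnd hlen
    rw [List.foldl_cons]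
    have h1 : d.foldl (fun dd kv => dd.modify kv.1 [] (fun x => x.set idx kv.2))
        (PySem.Dict.mk (primes.map fun p => (p, pre p ++ List.replicate (d :: t).length 0)))
        = PySem.Dict.mk (primes.map fun p =>
            (p, (pre p ++ [pvLkp d p]) ++ List.replicate t.length 0)) := by
      rw [pv_inner_fold d primes idx _ (hk d (List.mem_cons_self ..))]
      congr 1
      apply List.map_congr_left
      intro p _
      have hv := pv_vfold_lookup d idx p (pre p ++ List.replicate (d :: t).length 0)
        (hnd d (List.mem_cons_self ..))
      rw [hv]
      cases hg : (PySem.Dict.mk d).get? p with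
      | none => simp [pvLkp, hg, List.replicate_succ, List.append_assoc]
      | some v =>
        simp only [Option.elim, pvLkp, hg, Option.getD_some]
        rw [List.length_cons, List.replicate_succ, ← hlen p, pv_set_append]
        simp [List.append_assoc]
    rw [h1]
    rw [ih (idx + 1) (fun p => pre p ++ [pvLkp d p])
        (fun d' hd' => hk d' (List.mem_cons_of_mem _ hd'))
        (fun d' hd' => hnd d' (List.mem_cons_of_mem _ hd'))
        (fun p => by simp [hlen p])]
    congr 1
    apply List.map_congr_left
    intro p _
    simp

theorem pv_main (pfs : List (List (Int × Int))) :
    lineup_power_index pfs = lineup_power_index_alt pfs := by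
  unfold lineup_power_index lineup_power_index_alt
  dsimp only
  set ds : List (List (Int × Int)) := pfs.map pvCanon with hds
  have hlst : pfs.foldl (fun acc pf => acc ++ (pvCanon pf).map Prod.fst) ([] : List Int)
      = ds.flatMap (fun d => d.map Prod.fst) := by
    have h := PySem.List.foldl_append_eq_flatMap (fun pf => (pvCanon pf).map Prod.fst) pfs ([] : List Int)
    simpa [hds, List.flatMap_map, Function.comp] using h
  rw [hlst]
  set primes : List Int := PySem.Set.ofList (ds.flatMap (fun d => d.map Prod.fst)) with hpr
  have hnd : primes.Nodup := PySem.Set.nodup_ofList _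
  have hinit : primes.foldl (fun d p => d.insert p (List.replicate pfs.length (0 : Int))) (PySem.Dict.mk [])
      = PySem.Dict.mk (primes.map fun p => (p, List.replicate pfs.length (0 : Int))) := by
    have h := pv_init_fold primes (List.replicate pfs.length (0 : Int)) [] hnd (by simp)
    simpa using h
  rw [hinit]
  have hfm : pfs.foldl (fun (st : PySem.Dict Int (List Int) × Nat) pf =>
        ((pvCanon pf).foldl (fun dd kv => dd.modify kv.1 [] (fun x => x.set st.2 kv.2)) st.1, st.2 + 1))
        (PySem.Dict.mk (primes.map fun p => (p, List.replicate pfs.length 0)), 0)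
      = ds.foldl (fun (st : PySem.Dict Int (List Int) × Nat) d =>
        (d.foldl (fun dd kv => dd.modify kv.1 [] (fun x => x.set st.2 kv.2)) st.1, st.2 + 1))
        (PySem.Dict.mk (primes.map fun p => (p, List.replicate pfs.length 0)), 0) := by
    rw [hds, List.foldl_map]
  rw [hfm]
  have hrep : List.replicate pfs.length (0 : Int) = List.replicate ds.length 0 := by simp [hds]
  rw [hrep]
  have hk : ∀ d ∈ ds, ∀ kv ∈ d, kv.1 ∈ primes := by
    intro d hd kv hkv
    rw [hpr, PySem.Set.mem_ofList]
    exact List.mem_flatMap.mpr ⟨d, hd, List.mem_map_of_mem hkv⟩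
  have hnd2 : ∀ d ∈ ds, (d.map Prod.fst).Nodup := by
    intro d hd
    rcases List.mem_map.mp hd with ⟨pf, _, rfl⟩
    exact pv_canon_keys_nodup pf
  have houter := pv_outer_fold primes ds 0 (fun _ => []) hk hnd2 (by simp)
  simp only [List.nil_append] at houter
  rw [houter]
  apply List.map_congr_left
  intro p _
  simp [pvLkp, PySem.Dict.getD]

-- ===== VERDICT (by name: the statement is the Claim_ definition above) =====
theorem lineup_power_index_spec : Claim_equal_lineup_power_index := by
  intro pfs _
  unfold Spec_lineup_power_index
  exact pv_main pfs
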